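-- pv_equiv track=rewrite | github.com/al1brn/geonodes | core/utils.py | ensure_uniques
-- ===== SOURCE A (Python) =====
-- def ensure_uniques(names: list[str], single_digit: bool = False):
--     """ Build a list of unique names from a list
--
--     Doublons are suffixed by an index:
--     - ['key', 'key', 'other'] -> ['key', 'key_001', 'other']
--
--     Arguments
--     ---------
--     - names : list of names with possible doublons
--     - single_digit : 'key_1' rather that 'key_001'
--
--     Returns
--     -------
--     - list of str : doublons are suffixed by an index
--     """
--     homos  = {}
--     uniques = []
--     for name in names:
--         count = homos.get(name)
--         if count is None:
--             uniques.append(name)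
--             homos[name] = 1
--         else:
--             if single_digit:
--                 uniques.append(f"{name}_{count:d}")
--             else:
--                 uniques.append(f"{name}_{count:03d}")
--             homos[name] = count + 1
--     return uniques
-- ===== SOURCE B (Python) =====
-- def ensure_uniques(names: list[str], single_digit: bool = False):
--     """Uniquify by suffixing repeats: count totals first, then walk the list
--     backwards decrementing, so each element's suffix index is its remaining count;
--     the output is built back-to-front and reversed at the end."""
--     remaining = {}
--     for name in names:
--         remaining[name] = remaining.get(name, 0) + 1
--     out = []
--     for name in reversed(names):
--         k = remaining[name] = remaining[name] - 1
--         out.append(name if k == 0 else (f"{name}_{k:d}" if single_digit else f"{name}_{k:03d}"))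
--     out.reverse()
--     return out
-- ===== Notes on version B (the rewrite author's own statement) =====
-- stated objective: alternative
-- what changed: Replaces A's single forward pass carrying a dict of next suffix indices with a counting pass over the names followed by a reverse pass that decrements the totals, so each element's suffix index is its remaining count and the output is built back-to-front and reversed at the end.
import Mathlib
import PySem

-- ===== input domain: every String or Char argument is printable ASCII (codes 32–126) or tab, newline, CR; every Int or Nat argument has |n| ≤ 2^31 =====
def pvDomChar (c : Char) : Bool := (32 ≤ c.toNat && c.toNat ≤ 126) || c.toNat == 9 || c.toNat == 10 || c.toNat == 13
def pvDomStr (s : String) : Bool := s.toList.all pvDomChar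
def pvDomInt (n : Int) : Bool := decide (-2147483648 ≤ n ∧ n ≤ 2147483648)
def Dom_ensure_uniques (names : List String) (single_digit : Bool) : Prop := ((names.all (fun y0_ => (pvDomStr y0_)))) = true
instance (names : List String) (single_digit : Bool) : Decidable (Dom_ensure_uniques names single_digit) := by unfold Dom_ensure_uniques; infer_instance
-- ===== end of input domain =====

-- B replaces A's single forward pass carrying a dict of next suffix indices by a counting pass
-- plus a reverse pass that decrements the totals and builds the output back-to-front (alternative algorithm, same cost).

-- ===== PORT A =====
-- A's loop: a dict of next suffix indices plus the accumulated output list.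
def ensure_uniques (names : List String) (single_digit : Bool) : List String :=
  (names.foldl
    (fun (st : PySem.Dict String Int × List String) name =>
      match st.1.get? name with
      | none => (st.1.insert name 1, st.2 ++ [name])
      | some count =>
          (st.1.insert name (count + 1),
           st.2 ++ [if single_digit then name ++ "_" ++ PySem.Int.toStr count
                    else name ++ "_" ++ PySem.Str.zfill (PySem.Int.toStr count) 3]))
    ((PySem.Dict.empty : PySem.Dict String Int), ([] : List String))).2

-- ===== PORT B =====
-- Source B: counting pass, then a reverse pass decrementing the counts; `remaining[name]` is read
-- as getD (exact here: the key was inserted by the counting pass); `reversed`/final reverse = List.reverse.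
def ensure_uniques_alt (names : List String) (single_digit : Bool) : List String :=
  let remaining := names.foldl (fun d x => d.insert x (d.getD x 0 + 1))
    (PySem.Dict.empty : PySem.Dict String Int)
  let out := names.reverse.foldl
    (fun (st : PySem.Dict String Int × List String) name =>
      let k := st.1.getD name 0 - 1
      (st.1.insert name k,
       st.2 ++ [if k = 0 then name
                else if single_digit then name ++ "_" ++ PySem.Int.toStr k
                else name ++ "_" ++ PySem.Str.zfill (PySem.Int.toStr k) 3]))
    (remaining, ([] : List String))
  out.2.reverse

-- ===== PRECONDITION & SPEC =====
def Spec_ensure_uniques (names : List String) (single_digit : Bool) (out : List String) : Prop := out = ensure_uniques_alt names single_digit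
instance (names : List String) (single_digit : Bool) (out : List String) : Decidable (Spec_ensure_uniques names single_digit out) := by unfold Spec_ensure_uniques; infer_instance

-- ===== CLAIM (what is proved, stated in full; the proofs are below) =====
def Claim_equal_ensure_uniques : Prop := ∀ (names : List String) (single_digit : Bool), Dom_ensure_uniques names single_digit → Spec_ensure_uniques names single_digit (ensure_uniques names single_digit)

-- ===== LEMMAS AND PROOFS =====

-- Canonical suffixed form of one element whose prefix count is k.
def euFmt (single_digit : Bool) (name : String) (k : Int) : String :=
  if k = 0 then name
  else if single_digit then name ++ "_" ++ PySem.Int.toStr k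
  else name ++ "_" ++ PySem.Str.zfill (PySem.Int.toStr k) 3

-- Canonical middle form for A: process l forward after an already-seen prefix `pre`.
def euTail (sd : Bool) (pre l : List String) : List String :=
  match l with
  | [] => []
  | x :: xs => euFmt sd x ((pre.count x : Int)) :: euTail sd (pre ++ [x]) xs

-- Canonical middle form for B: process r backward; each element's index is its count in the rest.
def euRev (sd : Bool) (r : List String) : List String :=
  match r with
  | [] => []
  | x :: xs => euFmt sd x ((xs.count x : Int)) :: euRev sd xs

theorem euLoopA (sd : Bool) :
    ∀ (l pre : List String) (d : PySem.Dict String Int) (acc : List String),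
    (∀ nm, d.get? nm = if pre.count nm = 0 then none else some ((pre.count nm : Int))) →
    (l.foldl
      (fun (st : PySem.Dict String Int × List String) name =>
        match st.1.get? name with
        | none => (st.1.insert name 1, st.2 ++ [name])
        | some count =>
            (st.1.insert name (count + 1),
             st.2 ++ [if sd then name ++ "_" ++ PySem.Int.toStr count
                      else name ++ "_" ++ PySem.Str.zfill (PySem.Int.toStr count) 3]))
      (d, acc)).2 = acc ++ euTail sd pre l := by
  intro l
  induction l with
  | nil => intro pre d acc _; simp [euTail]
  | cons x xs ih =>
    intro pre d acc hd
    by_cases h0 : pre.count x = 0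
    · have hx : d.get? x = none := by rw [hd x]; simp [h0]
      simp only [List.foldl_cons, hx]
      rw [ih (pre ++ [x]) _ _ ?_]
      · simp [euTail, euFmt, h0]
      · intro nm
        by_cases hnm : nm = x
        · subst hnm
          rw [PySem.Dict.get?_insert_self]
          simp [h0]
        · rw [PySem.Dict.get?_insert_of_ne _ _ hnm, hd nm]
          have hxn : ¬(x = nm) := fun h => hnm h.symm
          have : (pre ++ [x]).count nm = pre.count nm := by
            simp [List.count_append, hxn]
          rw [this]
    · have hx : d.get? x = some ((pre.count x : Int)) := by rw [hd x]; simp [h0]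
      simp only [List.foldl_cons, hx]
      rw [ih (pre ++ [x]) _ _ ?_]
      · have hk : euFmt sd x ((pre.count x : Int)) =
            (if sd then x ++ "_" ++ PySem.Int.toStr ((pre.count x : Int))
             else x ++ "_" ++ PySem.Str.zfill (PySem.Int.toStr ((pre.count x : Int))) 3) := by
          simp [euFmt, h0]
        simp [euTail, hk]
      · intro nm
        by_cases hnm : nm = x
        · subst hnm
          rw [PySem.Dict.get?_insert_self]
          have : (pre ++ [nm]).count nm = pre.count nm + 1 := by
            simp [List.count_append]
          rw [this]
          simp
        · rw [PySem.Dict.get?_insert_of_ne _ _ hnm, hd nm]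
          have hxn : ¬(x = nm) := fun h => hnm h.symm
          have : (pre ++ [x]).count nm = pre.count nm := by
            simp [List.count_append, hxn]
          rw [this]

theorem euLoopB (sd : Bool) :
    ∀ (r : List String) (d : PySem.Dict String Int) (acc : List String),
    (∀ nm, d.getD nm 0 = (r.count nm : Int)) →
    (r.foldl
      (fun (st : PySem.Dict String Int × List String) name =>
        let k := st.1.getD name 0 - 1
        (st.1.insert name k,
         st.2 ++ [if k = 0 then name
                  else if sd then name ++ "_" ++ PySem.Int.toStr k
                  else name ++ "_" ++ PySem.Str.zfill (PySem.Int.toStr k) 3]))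
      (d, acc)).2 = acc ++ euRev sd r := by
  intro r
  induction r with
  | nil => intro d acc _; simp [euRev]
  | cons x xs ih =>
    intro d acc hd
    have hk : d.getD x 0 - 1 = ((xs.count x : Int)) := by
      rw [hd x]; simp
    simp only [List.foldl_cons, hk]
    rw [ih _ _ ?_]
    · simp [euRev, euFmt]
    · intro nm
      by_cases hnm : nm = x
      · subst hnm
        rw [PySem.Dict.getD_insert_self]
      · rw [PySem.Dict.getD_insert_of_ne _ _ _ hnm, hd nm]
        have hxn : ¬(x = nm) := fun h => hnm h.symm
        simp [hxn]

theorem euTail_append (sd : Bool) :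
    ∀ (ys pre : List String) (x : String),
    euTail sd pre (ys ++ [x]) = euTail sd pre ys ++ [euFmt sd x (((pre ++ ys).count x : Int))] := by
  intro ys
  induction ys with
  | nil => intro pre x; simp [euTail]
  | cons y ys ih =>
    intro pre x
    simp only [List.cons_append, euTail, ih (pre ++ [y]) x, List.append_assoc]
    rfl

theorem euRev_reverse (sd : Bool) :
    ∀ (l : List String), euRev sd l.reverse = (euTail sd [] l).reverse := by
  intro l
  induction l using List.reverseRecOn with
  | nil => simp [euRev, euTail]
  | append_singleton ys x ih =>
    rw [List.reverse_append]
    simp only [List.reverse_singleton, List.singleton_append, euRev, List.count_reverse, ih,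
      euTail_append sd ys [] x, List.reverse_append, List.reverse_singleton, List.singleton_append,
      List.nil_append]

-- ===== VERDICT (by name: the statement is the Claim_ definition above) =====
theorem ensure_uniques_spec : Claim_equal_ensure_uniques := by
  intro names sd _
  unfold Spec_ensure_uniques ensure_uniques ensure_uniques_alt
  rw [euLoopA sd names [] _ [] (by intro nm; simp [PySem.Dict.get?_empty])]
  dsimp only
  rw [euLoopB sd names.reverse _ []
      (by intro nm
          rw [PySem.Dict.getD_foldl_insert_add_one]
          simp [PySem.Dict.getD_empty, List.count_reverse])]
  rw [euRev_reverse sd names]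
  simp
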